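-- pv_equiv track=rewrite | github.com/Yusuf-bayrak-tar/CVResist | resistance.py | group_and_filter_bands
-- ===== SOURCE A (Python) =====
-- def group_and_filter_bands(bands, dist_thresh=20):
--     bands = sorted(bands, key=lambda b: b[0])
--     grouped = []
--     current = []
--
--     for band in bands:
--         if not current:
--             current.append(band)
--             continue
--         if abs(band[0] - current[-1][0]) < dist_thresh:
--             current.append(band)
--         else:
--             grouped.append(current)
--             current = [band]
--     if current:
--         grouped.append(current)
--
--     return [max(g, key=lambda b: b[4][2]*b[4][3]) for g in grouped]
-- ===== SOURCE B (Python) =====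
-- def group_and_filter_bands(bands, dist_thresh=20):
--     # One fused pass over the sorted bands: keep only the current group's best
--     # band (by area b[4][2]*b[4][3], first-wins on ties) and the previous b[0];
--     # no intermediate list of groups is ever built.
--     res = []
--     best = None
--     for band in sorted(bands, key=lambda b: b[0]):
--         area = band[4][2] * band[4][3]
--         if best is None or abs(band[0] - prev) >= dist_thresh:
--             if best is not None:
--                 res.append(best)
--             best, best_area = band, area
--         elif area > best_area:
--             best, best_area = band, area
--         prev = band[0]
--     if best is not None:
--         res.append(best)
--     return res
-- ===== Notes on version B (the rewrite author's own statement) =====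
-- stated objective: simpler
-- what changed: Replaces the build-list-of-groups-then-max-per-group two-phase algorithm with a single fused pass over the sorted bands that maintains only the current group's best band and its area, flushing on a group break.
import Mathlib
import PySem

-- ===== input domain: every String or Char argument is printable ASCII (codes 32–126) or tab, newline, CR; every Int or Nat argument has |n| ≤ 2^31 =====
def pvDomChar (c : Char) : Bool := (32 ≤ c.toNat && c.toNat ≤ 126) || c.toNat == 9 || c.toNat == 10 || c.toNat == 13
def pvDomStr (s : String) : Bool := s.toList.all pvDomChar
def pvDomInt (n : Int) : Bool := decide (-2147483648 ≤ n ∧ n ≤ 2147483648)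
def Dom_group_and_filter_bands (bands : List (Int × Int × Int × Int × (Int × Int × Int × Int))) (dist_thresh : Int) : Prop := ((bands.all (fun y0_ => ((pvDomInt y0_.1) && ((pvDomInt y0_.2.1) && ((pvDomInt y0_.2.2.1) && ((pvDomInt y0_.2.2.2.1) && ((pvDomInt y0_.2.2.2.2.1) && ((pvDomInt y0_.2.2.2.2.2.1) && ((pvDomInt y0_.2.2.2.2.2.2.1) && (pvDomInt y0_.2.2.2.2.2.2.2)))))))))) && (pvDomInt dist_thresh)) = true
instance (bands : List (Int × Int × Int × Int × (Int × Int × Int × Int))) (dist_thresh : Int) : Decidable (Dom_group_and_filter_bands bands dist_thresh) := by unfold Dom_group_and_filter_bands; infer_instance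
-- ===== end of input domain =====

-- ===== PORT A =====
-- one fused-loop B vs two-phase A; B is simpler (no intermediate list of groups); equivalence of return values proved below
abbrev pvBand : Type := Int × Int × Int × Int × (Int × Int × Int × Int)

def pvArea (b : pvBand) : Int := b.2.2.2.2.2.2.1 * b.2.2.2.2.2.2.2

def pvAStep (dist_thresh : Int) (st : List (List pvBand) × List pvBand) (band : pvBand) :
    List (List pvBand) × List pvBand :=
  match st with
  | (grouped, []) => (grouped, [band])
  | (grouped, c :: cs) =>
    if |band.1 - ((c :: cs).getLast (by simp)).1| < dist_thresh then
      (grouped, (c :: cs) ++ [band])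
    else
      (grouped ++ [c :: cs], [band])

def group_and_filter_bands (bands : List (Int × Int × Int × Int × (Int × Int × Int × Int))) (dist_thresh : Int) : List (Int × Int × Int × Int × (Int × Int × Int × Int)) :=
  let sb := PySem.List.sorted bands (fun b => b.1) false
  let st := sb.foldl (pvAStep dist_thresh) ([], [])
  let grouped := if st.2 = [] then st.1 else st.1 ++ [st.2]
  -- [max(g, key=...) for g in grouped]: every g is nonempty, so max? is always some; filterMap keeps the ports total
  grouped.filterMap (fun g => PySem.List.max? g pvArea)

-- ===== PORT B =====
def pvBStep (dist_thresh : Int) (st : List pvBand × Option (pvBand × Int × Int)) (band : pvBand) :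
    List pvBand × Option (pvBand × Int × Int) :=
  let area := pvArea band
  match st with
  | (res, none) => (res, some (band, area, band.1))
  | (res, some (best, bestArea, prev)) =>
    if dist_thresh ≤ |band.1 - prev| then
      (res ++ [best], some (band, area, band.1))
    else if bestArea < area then
      (res, some (band, area, band.1))
    else
      (res, some (best, bestArea, band.1))

def group_and_filter_bands_alt (bands : List (Int × Int × Int × Int × (Int × Int × Int × Int))) (dist_thresh : Int) : List (Int × Int × Int × Int × (Int × Int × Int × Int)) :=
  let st := (PySem.List.sorted bands (fun b => b.1) false).foldl (pvBStep dist_thresh) ([], none)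
  match st.2 with
  | none => st.1
  | some (best, _, _) => st.1 ++ [best]

-- ===== PRECONDITION & SPEC =====
def Spec_group_and_filter_bands (bands : List (Int × Int × Int × Int × (Int × Int × Int × Int))) (dist_thresh : Int) (out : List (Int × Int × Int × Int × (Int × Int × Int × Int))) : Prop := out = group_and_filter_bands_alt bands dist_thresh
instance (bands : List (Int × Int × Int × Int × (Int × Int × Int × Int))) (dist_thresh : Int) (out : List (Int × Int × Int × Int × (Int × Int × Int × Int))) : Decidable (Spec_group_and_filter_bands bands dist_thresh out) := by
  unfold Spec_group_and_filter_bands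
  have h5 : DecidableEq (Int × Int × Int × Int × Int) := inferInstance
  have h8 : DecidableEq (Int × Int × Int × Int × (Int × Int × Int × Int)) :=
    @instDecidableEqProd _ _ inferInstance (@instDecidableEqProd _ _ inferInstance (@instDecidableEqProd _ _ inferInstance h5))
  exact @instDecidableEqList _ h8 _ _

-- ===== CLAIM (what is proved, stated in full; the proofs are below) =====
def Claim_equal_group_and_filter_bands : Prop := ∀ (bands : List (Int × Int × Int × Int × (Int × Int × Int × Int))) (dist_thresh : Int), Dom_group_and_filter_bands bands dist_thresh → Spec_group_and_filter_bands bands dist_thresh (group_and_filter_bands bands dist_thresh)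

-- ===== LEMMAS AND PROOFS =====

def pvMaxG (g : List pvBand) : Option pvBand := PySem.List.max? g pvArea

def pvFinB (st : List pvBand × Option (pvBand × Int × Int)) : List pvBand :=
  match st.2 with
  | none => st.1
  | some (b, _, _) => st.1 ++ [b]

def pvFinA (st : List (List pvBand) × List pvBand) : List pvBand :=
  (if st.2 = [] then st.1 else st.1 ++ [st.2]).filterMap pvMaxG

theorem pvMaxG_append_one (c : List pvBand) (m b : pvBand) (hm : pvMaxG c = some m) :
    pvMaxG (c ++ [b]) = if pvArea m < pvArea b then some b else some m := by
  simp only [pvMaxG, PySem.List.max?] at hm ⊢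
  simp [List.foldl_append, hm]

theorem pv_main (dt : Int) (xs : List pvBand) :
    ∀ (grouped : List (List pvBand)) (c : List pvBand) (m : pvBand)
      (hm : pvMaxG c = some m) (hc : c ≠ []) (prev : Int)
      (hp : prev = (c.getLast hc).1),
    pvFinB (xs.foldl (pvBStep dt) (grouped.filterMap pvMaxG, some (m, pvArea m, prev)))
    = pvFinA (xs.foldl (pvAStep dt) (grouped, c)) := by
  induction xs with
  | nil =>
    intro grouped c m hm hc prev hp
    simp [pvFinA, pvFinB, hc, List.filterMap_append, pvMaxG] at hm ⊢
    simp [hm]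
  | cons b rest ih =>
    intro grouped c m hm hc prev hp
    obtain ⟨c0, cs, rfl⟩ : ∃ c0 cs, c = c0 :: cs := by
      cases c with
      | nil => exact absurd rfl hc
      | cons c0 cs => exact ⟨c0, cs, rfl⟩
    by_cases hlt : |b.1 - prev| < dt
    · -- band joins the current group
      have hA : pvAStep dt (grouped, c0 :: cs) b = (grouped, (c0 :: cs) ++ [b]) := by
        simp [pvAStep, ← hp, hlt]
      have hB : pvBStep dt (grouped.filterMap pvMaxG, some (m, pvArea m, prev)) b
          = (grouped.filterMap pvMaxG,
             some (if pvArea m < pvArea b then b else m,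
                   pvArea (if pvArea m < pvArea b then b else m), b.1)) := by
        by_cases harea : pvArea m < pvArea b <;>
          simp [pvBStep, not_le.mpr hlt, harea]
      rw [List.foldl_cons, List.foldl_cons, hA, hB]
      exact ih grouped ((c0 :: cs) ++ [b])
        (if pvArea m < pvArea b then b else m)
        (by rw [pvMaxG_append_one _ m b hm]; split <;> rfl)
        (by simp) b.1 (by simp)
    · -- group break: flush the current group
      have hA : pvAStep dt (grouped, c0 :: cs) b = (grouped ++ [c0 :: cs], [b]) := by
        simp [pvAStep, ← hp, hlt]
      have hB : pvBStep dt (grouped.filterMap pvMaxG, some (m, pvArea m, prev)) b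
          = (grouped.filterMap pvMaxG ++ [m], some (b, pvArea b, b.1)) := by
        simp [pvBStep, not_lt.mp hlt]
      rw [List.foldl_cons, List.foldl_cons, hA, hB]
      have := ih (grouped ++ [c0 :: cs]) [b] b
        (by simp [pvMaxG, PySem.List.max?]) (by simp) b.1 (by simp)
      rwa [List.filterMap_append, show [c0 :: cs].filterMap pvMaxG = [m] by simp [hm]] at this

-- ===== VERDICT (by name: the statement is the Claim_ definition above) =====
theorem group_and_filter_bands_spec : Claim_equal_group_and_filter_bands := by
  intro bands dt _
  unfold Spec_group_and_filter_bands
  show group_and_filter_bands bands dt = group_and_filter_bands_alt bands dt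
  unfold group_and_filter_bands group_and_filter_bands_alt
  cases hs : PySem.List.sorted bands (fun b => b.1) false with
  | nil => simp [pvFinA]
  | cons b rest =>
    have h1 : pvAStep dt ([], []) b = ([], [b]) := by simp [pvAStep]
    have h2 : pvBStep dt ([], none) b = ([], some (b, pvArea b, b.1)) := by
      simp [pvBStep]
    have key := pv_main dt rest [] [b] b
      (by simp [pvMaxG, PySem.List.max?]) (by simp) b.1 (by simp)
    simp only [List.filterMap_nil] at key
    simp only [List.foldl_cons, h1, h2]
    exact (key.symm).trans rfl
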